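-- pv_equiv track=rewrite | github.com/ejolie/problem-solving | SWEA/D2/swea4836.py | paintCanvas
-- ===== SOURCE A (Python) =====
-- def paintCanvas(arr, n):
--     canvas = [[0] * 10 for i in range(10)]
--     for i in range(n):
--         for j in range(arr[i][1], arr[i][3]+1):
--             for k in range(arr[i][0], arr[i][2]+1):
--                 canvas[j][k] += arr[i][4]
--     cnt = 0
--     for i in range(10):
--         for j in range(10):
--             if canvas[i][j] == 3:
--                 cnt += 1
--     return cnt
-- ===== SOURCE B (Python) =====
-- def paintCanvas(arr, n):
--     # 2D difference array: 4 corner updates per rectangle instead of painting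
--     # its whole area, then one prefix-sum sweep reconstructs every cell.
--     diff = [[0] * 11 for _ in range(11)]
--     for i in range(n):
--         x0, y0, x2, y2, v = arr[i][:5]
--         if x0 <= x2 and y0 <= y2:
--             diff[y0][x0] += v
--             diff[y0][x2 + 1] -= v
--             diff[y2 + 1][x0] -= v
--             diff[y2 + 1][x2 + 1] += v
--     cnt = 0
--     prev = [0] * 10
--     for y in range(10):
--         run = 0
--         cur = []
--         for x in range(10):
--             run += diff[y][x]
--             cur.append(run + prev[x])
--         cnt += cur.count(3)
--         prev = cur
--     return cnt
-- ===== Notes on version B (the rewrite author's own statement) =====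
-- stated objective: faster
-- what changed: Replaces per-cell painting of every rectangle's whole area with a 2D difference array (4 corner updates per rectangle) followed by a single prefix-sum sweep that reconstructs each cell's total before counting cells equal to 3.
-- outside the precondition, e.g. on paintCanvas([[0, 1, 0, 0]], 1): A returns 0, B raises ValueError; on paintCanvas([[-1, 0, -1, 0, 3]], 1): A returns 1, B returns 0
import Mathlib
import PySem

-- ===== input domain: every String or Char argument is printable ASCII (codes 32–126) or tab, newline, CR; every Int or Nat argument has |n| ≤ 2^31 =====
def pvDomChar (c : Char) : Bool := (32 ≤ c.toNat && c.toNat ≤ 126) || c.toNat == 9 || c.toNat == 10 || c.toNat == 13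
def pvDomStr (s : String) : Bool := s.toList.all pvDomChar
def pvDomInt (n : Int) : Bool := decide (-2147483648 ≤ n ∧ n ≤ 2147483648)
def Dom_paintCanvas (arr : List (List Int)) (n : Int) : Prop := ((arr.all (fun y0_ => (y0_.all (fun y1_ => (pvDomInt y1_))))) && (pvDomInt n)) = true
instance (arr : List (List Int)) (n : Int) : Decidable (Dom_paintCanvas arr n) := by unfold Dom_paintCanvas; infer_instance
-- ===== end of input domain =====

-- B replaces A's per-cell painting of each rectangle's whole area by a 2D difference
-- array (4 corner updates per rectangle) plus one prefix-sum sweep; same return value on Pre_.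

-- Shared grid helpers: Python's `g[j][k]` read and `g[j][k] += v` on a list of lists
-- (total forms of the PySem primitives; exact wherever the indices are in range, which Pre_ guarantees).
def pvGet2 (g : List (List Int)) (j k : Int) : Int :=
  PySem.List.pyGetD (PySem.List.pyGetD g j []) k 0

def pvAdd2 (g : List (List Int)) (j k v : Int) : List (List Int) :=
  PySem.List.pySetD g j (PySem.List.pySetD (PySem.List.pyGetD g j []) k (pvGet2 g j k + v))

-- ===== PORT A =====
def paintCanvas (arr : List (List Int)) (n : Int) : Int :=
  let canvas : List (List Int) := List.replicate 10 (List.replicate 10 (0 : Int))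
  let canvas := (PySem.List.pyRange 0 n).foldl (fun c i =>
      let r := PySem.List.pyGetD arr i []
      (PySem.List.pyRange (PySem.List.pyGetD r 1 0) (PySem.List.pyGetD r 3 0 + 1)).foldl (fun c j =>
        (PySem.List.pyRange (PySem.List.pyGetD r 0 0) (PySem.List.pyGetD r 2 0 + 1)).foldl (fun c k =>
          pvAdd2 c j k (PySem.List.pyGetD r 4 0)) c) c) canvas
  (PySem.List.pyRange 0 10).foldl (fun cnt i =>
    (PySem.List.pyRange 0 10).foldl (fun cnt j =>
      if pvGet2 canvas i j = 3 then cnt + 1 else cnt) cnt) 0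

-- ===== PORT B =====
def paintCanvas_alt (arr : List (List Int)) (n : Int) : Int :=
  let diff : List (List Int) := List.replicate 11 (List.replicate 11 (0 : Int))
  let diff := (PySem.List.pyRange 0 n).foldl (fun d i =>
      let r := PySem.List.pyGetD arr i []
      let x0 := PySem.List.pyGetD r 0 0
      let y0 := PySem.List.pyGetD r 1 0
      let x2 := PySem.List.pyGetD r 2 0
      let y2 := PySem.List.pyGetD r 3 0
      let v  := PySem.List.pyGetD r 4 0
      if x0 ≤ x2 ∧ y0 ≤ y2 then
        pvAdd2 (pvAdd2 (pvAdd2 (pvAdd2 d y0 x0 v) y0 (x2 + 1) (-v)) (y2 + 1) x0 (-v)) (y2 + 1) (x2 + 1) v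
      else d) diff
  (((PySem.List.pyRange 0 10).foldl (fun (s : List Int × Int) (y : Int) =>
      let inner := (PySem.List.pyRange 0 10).foldl (fun (t : Int × List Int) (x : Int) =>
          let run := t.1 + pvGet2 diff y x
          (run, t.2 ++ [run + PySem.List.pyGetD s.1 x 0])) ((0 : Int), ([] : List Int))
      (inner.2, s.2 + (PySem.List.count inner.2 3 : Int)))
    (List.replicate 10 (0 : Int), (0 : Int)))).2

-- ===== PRECONDITION & SPEC =====
-- Pre_ excludes inputs where A raises (n > len(arr), a too-short row, an index outside
-- the canvas) and rows whose coordinates lie outside 0..9: there A either raises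
-- IndexError or silently relies on Python's negative-index wraparound, and a row of
-- length 4 whose empty range A never enters makes B's 5-way unpacking raise ValueError.
def Pre_paintCanvas (arr : List (List Int)) (n : Int) : Prop :=
  n ≤ arr.length ∧ ∀ r ∈ arr.take n.toNat,
    5 ≤ r.length ∧
      (PySem.List.pyGetD r 2 0 < PySem.List.pyGetD r 0 0 ∨
       PySem.List.pyGetD r 3 0 < PySem.List.pyGetD r 1 0 ∨
       (0 ≤ PySem.List.pyGetD r 0 0 ∧ PySem.List.pyGetD r 2 0 ≤ 9 ∧
        0 ≤ PySem.List.pyGetD r 1 0 ∧ PySem.List.pyGetD r 3 0 ≤ 9))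
instance (arr : List (List Int)) (n : Int) : Decidable (Pre_paintCanvas arr n) := by
  unfold Pre_paintCanvas; infer_instance

def pvWitness_paintCanvas : List (List Int) × Int := ([[0, 0, 9, 9, 3], [2, 1, 4, 3, 1]], 2)

def Spec_paintCanvas (arr : List (List Int)) (n : Int) (out : Int) : Prop := out = paintCanvas_alt arr n
instance (arr : List (List Int)) (n : Int) (out : Int) : Decidable (Spec_paintCanvas arr n out) := by
  unfold Spec_paintCanvas; infer_instance

-- ===== CLAIM (what is proved, stated in full; the proofs are below) =====
def Claim_equal_paintCanvas : Prop := ∀ (arr : List (List Int)) (n : Int), Dom_paintCanvas arr n → Pre_paintCanvas arr n → Spec_paintCanvas arr n (paintCanvas arr n)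

-- ===== LEMMAS AND PROOFS =====

def pvShape (g : List (List Int)) (m : Nat) : Prop :=
  g.length = m ∧ ∀ row ∈ g, row.length = m

-- grid lemmas
theorem pvShape_pvAdd2 {g : List (List Int)} {m : Nat} (hg : pvShape g m)
    {j : Int} (hj0 : 0 ≤ j) (hjm : j < (m : Int)) (k v : Int) :
    pvShape (pvAdd2 g j k v) m := by
  obtain ⟨hl, hr⟩ := hg
  have hjn : j.toNat < g.length := by omega
  unfold pvAdd2
  rw [PySem.List.pySetD_of_nonneg _ _ hj0]
  constructor
  · simpa using hl
  · intro row hrow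
    rcases List.mem_or_eq_of_mem_set hrow with h | h
    · exact hr row h
    · subst h
      rw [PySem.List.length_pySetD]
      have : PySem.List.pyGetD g j [] = g[j.toNat] := by
        rw [PySem.List.pyGetD_of_nonneg _ _ hj0, List.getD_eq_getElem?_getD,
          List.getElem?_eq_getElem hjn]; rfl
      rw [this]
      exact hr _ (List.getElem_mem hjn)

theorem pvGet2_pvAdd2 {g : List (List Int)} {m : Nat} (hg : pvShape g m)
    {j k y x : Int} (hj : 0 ≤ j ∧ j < (m : Int)) (hk : 0 ≤ k ∧ k < (m : Int))
    (hy : 0 ≤ y ∧ y < (m : Int)) (hx : 0 ≤ x ∧ x < (m : Int)) (v : Int) :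
    pvGet2 (pvAdd2 g j k v) y x = pvGet2 g y x + (if y = j ∧ x = k then v else 0) := by
  obtain ⟨hl, hr⟩ := hg
  lift j to ℕ using hj.1 with jn
  lift k to ℕ using hk.1 with kn
  lift y to ℕ using hy.1 with yn
  lift x to ℕ using hx.1 with xn
  have hjn : jn < g.length := by omega
  have hrowlen : (PySem.List.pyGetD g (jn : Int) []).length = m := by
    rw [PySem.List.pyGetD_of_nonneg _ _ (by positivity), Int.toNat_natCast,
      List.getD_eq_getElem?_getD, List.getElem?_eq_getElem hjn]
    exact hr _ (List.getElem_mem hjn)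
  have hkn : kn < (PySem.List.pyGetD g (jn:Int) []).length := by omega
  unfold pvAdd2 pvGet2
  rw [PySem.List.pyGetD_pySetD_natCast _ _ _ _ _ hjn]
  by_cases hyj : yn = jn
  · subst hyj
    simp only [if_true]
    rw [PySem.List.pyGetD_pySetD_natCast _ _ _ _ _ hkn]
    by_cases hxk : xn = kn
    · subst hxk; simp [pvGet2]
    · simp [hxk, Int.natCast_inj]
  · simp [hyj, Int.natCast_inj]

theorem pvPyGet?_mem {α : Type} {xs : List α} {i : Int} {r : α}
    (h : PySem.List.pyGet? xs i = some r) : r ∈ xs := by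
  unfold PySem.List.pyGet? at h
  rcases ho : PySem.List.pyIdx? xs.length i with _ | k <;> rw [ho] at h
  · simp at h
  · simp only [Option.bind_some] at h
    exact List.mem_of_getElem? h

theorem pvGet2_zero (m m' : Nat) (y x : Int) :
    pvGet2 (List.replicate m (List.replicate m' (0 : Int))) y x = 0 := by
  unfold pvGet2
  have : PySem.List.pyGetD (List.replicate m (List.replicate m' (0 : Int))) y [] = List.replicate m' (0:Int)
      ∨ PySem.List.pyGetD (List.replicate m (List.replicate m' (0 : Int))) y [] = ([] : List Int) := by
    unfold PySem.List.pyGetD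
    rcases h : PySem.List.pyGet? (List.replicate m (List.replicate m' (0 : Int))) y with _ | r
    · right; rfl
    · left
      have := pvPyGet?_mem h
      simpa using (List.eq_of_mem_replicate this)
  rcases this with h | h <;> rw [h]
  · rcases h2 : PySem.List.pyGet? (List.replicate m' (0:Int)) x with _ | r
    · simp [PySem.List.pyGetD, h2]
    · have := pvPyGet?_mem h2
      simp [PySem.List.pyGetD, h2, List.eq_of_mem_replicate this]
  · simp [PySem.List.pyGetD, PySem.List.pyGet?]

theorem pvNodup_pyRange (a b : Int) : (PySem.List.pyRange a b).Nodup := by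
  rw [PySem.List.pyRange_of_pos a b (by norm_num)]
  exact List.Nodup.map (fun p q h => by omega) List.nodup_range

theorem pvCount_pyRange (a b c : Int) :
    (List.count c (PySem.List.pyRange a b) : Int) = if a ≤ c ∧ c < b then 1 else 0 := by
  rw [List.Nodup.count (pvNodup_pyRange a b)]
  by_cases h : c ∈ PySem.List.pyRange a b
  · rw [if_pos h, if_pos (PySem.List.mem_pyRange_one.mp h)]; rfl
  · rw [if_neg h, if_neg (fun hc => h (PySem.List.mem_pyRange_one.mpr hc))]; rfl

theorem pvPyRange_nil {a b : Int} (h : b ≤ a) : PySem.List.pyRange a b = [] := by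
  rw [PySem.List.pyRange_of_pos a b (by norm_num)]
  rw [if_neg (by omega)]
  simp

-- ===== A side =====
def pvPaintRectA (c : List (List Int)) (r : List Int) : List (List Int) :=
  (PySem.List.pyRange (PySem.List.pyGetD r 1 0) (PySem.List.pyGetD r 3 0 + 1)).foldl (fun c j =>
    (PySem.List.pyRange (PySem.List.pyGetD r 0 0) (PySem.List.pyGetD r 2 0 + 1)).foldl (fun c k =>
      pvAdd2 c j k (PySem.List.pyGetD r 4 0)) c) c

def pvWF (r : List Int) : Prop :=
  5 ≤ r.length ∧
    (PySem.List.pyGetD r 2 0 < PySem.List.pyGetD r 0 0 ∨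
     PySem.List.pyGetD r 3 0 < PySem.List.pyGetD r 1 0 ∨
     (0 ≤ PySem.List.pyGetD r 0 0 ∧ PySem.List.pyGetD r 2 0 ≤ 9 ∧
      0 ≤ PySem.List.pyGetD r 1 0 ∧ PySem.List.pyGetD r 3 0 ≤ 9))

def pvContrib (r : List Int) (y x : Int) : Int :=
  if PySem.List.pyGetD r 0 0 ≤ x ∧ x ≤ PySem.List.pyGetD r 2 0 ∧
     PySem.List.pyGetD r 1 0 ≤ y ∧ y ≤ PySem.List.pyGetD r 3 0
  then PySem.List.pyGetD r 4 0 else 0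

def pvVal (rs : List (List Int)) (y x : Int) : Int := (rs.map (fun r => pvContrib r y x)).sum

theorem pvInnerA {m : Nat} (ks : List Int) (hks : ∀ k ∈ ks, 0 ≤ k ∧ k < (m : Int))
    {j : Int} (v : Int) (hj : 0 ≤ j ∧ j < (m : Int)) :
    ∀ g, pvShape g m →
      pvShape (ks.foldl (fun c k => pvAdd2 c j k v) g) m ∧
      ∀ y x : Int, (0 ≤ y ∧ y < (m : Int)) → (0 ≤ x ∧ x < (m : Int)) →
        pvGet2 (ks.foldl (fun c k => pvAdd2 c j k v) g) y x =
          pvGet2 g y x + (if y = j then v * (List.count x ks : Int) else 0) := by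
  induction ks with
  | nil => intro g hg; refine ⟨hg, ?_⟩; intro y x hy hx; simp
  | cons k ks ih =>
    intro g hg
    have hk := hks k (by simp)
    have hks' : ∀ k ∈ ks, 0 ≤ k ∧ k < (m : Int) := fun k hk => hks k (by simp [hk])
    have hg' : pvShape (pvAdd2 g j k v) m := pvShape_pvAdd2 hg hj.1 hj.2 k v
    obtain ⟨hsh, hval⟩ := ih hks' (pvAdd2 g j k v) hg'
    refine ⟨hsh, ?_⟩
    intro y x hy hx
    rw [List.foldl_cons, hval y x hy hx, pvGet2_pvAdd2 hg hj hk hy hx v, List.count_cons]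
    simp only [beq_iff_eq]
    split_ifs <;> (try push_cast) <;> first | ring1 | omega

theorem pvOuterA {m : Nat} (js ks : List Int) (hjs : ∀ j ∈ js, 0 ≤ j ∧ j < (m : Int))
    (hks : ∀ k ∈ ks, 0 ≤ k ∧ k < (m : Int)) (v : Int) :
    ∀ g, pvShape g m →
      pvShape (js.foldl (fun c j => ks.foldl (fun c k => pvAdd2 c j k v) c) g) m ∧
      ∀ y x : Int, (0 ≤ y ∧ y < (m : Int)) → (0 ≤ x ∧ x < (m : Int)) →
        pvGet2 (js.foldl (fun c j => ks.foldl (fun c k => pvAdd2 c j k v) c) g) y x =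
          pvGet2 g y x + v * (List.count y js : Int) * (List.count x ks : Int) := by
  induction js with
  | nil => intro g hg; refine ⟨hg, ?_⟩; intro y x hy hx; simp
  | cons j js ih =>
    intro g hg
    have hj := hjs j (by simp)
    have hjs' : ∀ j ∈ js, 0 ≤ j ∧ j < (m : Int) := fun j hj => hjs j (by simp [hj])
    obtain ⟨hsh1, hval1⟩ := pvInnerA ks hks v hj g hg
    obtain ⟨hsh, hval⟩ := ih hjs' _ hsh1
    refine ⟨hsh, ?_⟩
    intro y x hy hx
    rw [List.foldl_cons, hval y x hy hx, hval1 y x hy hx, List.count_cons]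
    simp only [beq_iff_eq]
    split_ifs <;> (try push_cast) <;> first | ring1 | omega

theorem pvRectA (r : List Int) (hr : pvWF r) :
    ∀ g, pvShape g 10 →
      pvShape (pvPaintRectA g r) 10 ∧
      ∀ y x : Int, (0 ≤ y ∧ y < 10) → (0 ≤ x ∧ x < 10) →
        pvGet2 (pvPaintRectA g r) y x = pvGet2 g y x + pvContrib r y x := by
  intro g hg
  unfold pvPaintRectA pvContrib
  by_cases hxe : PySem.List.pyGetD r 2 0 < PySem.List.pyGetD r 0 0
  · rw [pvPyRange_nil (a := PySem.List.pyGetD r 0 0) (by omega)]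
    simp only [List.foldl_nil, PySem.List.foldl_ignore]
    exact ⟨hg, fun y x hy hx => by rw [if_neg (by omega)]; ring⟩
  · by_cases hye : PySem.List.pyGetD r 3 0 < PySem.List.pyGetD r 1 0
    · rw [pvPyRange_nil (a := PySem.List.pyGetD r 1 0) (by omega)]
      simp only [List.foldl_nil]
      exact ⟨hg, fun y x hy hx => by rw [if_neg (by omega)]; ring⟩
    · obtain ⟨hb1, hb2, hb3, hb4⟩ : 0 ≤ PySem.List.pyGetD r 0 0 ∧ PySem.List.pyGetD r 2 0 ≤ 9 ∧
          0 ≤ PySem.List.pyGetD r 1 0 ∧ PySem.List.pyGetD r 3 0 ≤ 9 := by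
        rcases hr.2 with h | h | h
        · omega
        · omega
        · exact h
      have hjs : ∀ j ∈ PySem.List.pyRange (PySem.List.pyGetD r 1 0) (PySem.List.pyGetD r 3 0 + 1),
          0 ≤ j ∧ j < ((10 : Nat) : Int) := by
        intro j hj; have := PySem.List.mem_pyRange_one.mp hj; constructor <;> omega
      have hks : ∀ k ∈ PySem.List.pyRange (PySem.List.pyGetD r 0 0) (PySem.List.pyGetD r 2 0 + 1),
          0 ≤ k ∧ k < ((10 : Nat) : Int) := by
        intro k hk; have := PySem.List.mem_pyRange_one.mp hk; constructor <;> omega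
      obtain ⟨hs, hv⟩ := pvOuterA _ _ hjs hks (PySem.List.pyGetD r 4 0) g hg
      refine ⟨by simpa using hs, ?_⟩
      intro y x hy hx
      rw [hv y x (by push_cast; omega) (by push_cast; omega), pvCount_pyRange, pvCount_pyRange]
      split_ifs <;> (try push_cast) <;> first | ring1 | omega

theorem pvCanvasA (rs : List (List Int)) (hrs : ∀ r ∈ rs, pvWF r) :
    ∀ g, pvShape g 10 →
      pvShape (rs.foldl pvPaintRectA g) 10 ∧
      ∀ y x : Int, (0 ≤ y ∧ y < 10) → (0 ≤ x ∧ x < 10) →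
        pvGet2 (rs.foldl pvPaintRectA g) y x = pvGet2 g y x + pvVal rs y x := by
  induction rs with
  | nil => intro g hg; exact ⟨hg, by intro y x hy hx; simp [pvVal]⟩
  | cons r rs ih =>
    intro g hg
    obtain ⟨hs1, hv1⟩ := pvRectA r (hrs r (by simp)) g hg
    obtain ⟨hs, hv⟩ := ih (fun r hr => hrs r (by simp [hr])) _ hs1
    refine ⟨hs, ?_⟩
    intro y x hy hx
    rw [List.foldl_cons, hv y x hy hx, hv1 y x hy hx]
    simp [pvVal]; ring

theorem pvRows (arr : List (List Int)) (n : Int) (h : n ≤ (arr.length : Int)) :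
    (PySem.List.pyRange 0 n).map (fun i => PySem.List.pyGetD arr i []) = arr.take n.toNat := by
  by_cases hn : n ≤ 0
  · rw [pvPyRange_nil hn]
    have h0 : n.toNat = 0 := by omega
    simp [h0]
  · push_neg at hn
    have hn' : n = (n.toNat : Int) := by omega
    rw [hn', PySem.List.pyRange_zero_natCast, List.map_map]
    apply List.ext_getElem
    · simp; omega
    · intro i h1 h2
      simp only [List.getElem_map, List.getElem_range, Function.comp_apply, List.getElem_take]
      have hi : i < n.toNat := by simpa using h1
      rw [PySem.List.pyGetD_eq_getElem arr [] (by positivity) (by push_cast; omega)]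
      simp

-- ===== B side =====
def pvApplyRectB (d : List (List Int)) (r : List Int) : List (List Int) :=
  let x0 := PySem.List.pyGetD r 0 0
  let y0 := PySem.List.pyGetD r 1 0
  let x2 := PySem.List.pyGetD r 2 0
  let y2 := PySem.List.pyGetD r 3 0
  let v  := PySem.List.pyGetD r 4 0
  if x0 ≤ x2 ∧ y0 ≤ y2 then
    pvAdd2 (pvAdd2 (pvAdd2 (pvAdd2 d y0 x0 v) y0 (x2 + 1) (-v)) (y2 + 1) x0 (-v)) (y2 + 1) (x2 + 1) v
  else d

def pvQuad (d : List (List Int)) (y x : Int) : Int :=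
  ((PySem.List.pyRange 0 (y + 1)).map (fun b =>
    ((PySem.List.pyRange 0 (x + 1)).map (fun a => pvGet2 d b a)).sum)).sum

theorem pvSumPt (l : List Int) (e w : Int) :
    (l.map (fun a => if a = e then w else 0)).sum = w * (List.count e l : Int) := by
  induction l with
  | nil => simp
  | cons a l ih =>
    rw [List.map_cons, List.sum_cons, ih, List.count_cons]
    simp only [beq_iff_eq]
    split_ifs <;> (try push_cast) <;> first | ring1 | omega

theorem pvSumPt2 (l : List Int) (b c e w : Int) :
    (l.map (fun a => if b = c ∧ a = e then w else 0)).sum =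
      if b = c then w * (List.count e l : Int) else 0 := by
  by_cases hbc : b = c
  · rw [if_pos hbc, ← pvSumPt l e w]
    exact congrArg _ (List.map_congr_left (fun a _ => by simp [hbc]))
  · rw [if_neg hbc]
    rw [List.map_congr_left (fun a _ => by simp [hbc] : ∀ a ∈ l, (if b = c ∧ a = e then w else 0) = 0)]
    simp

theorem pvRectB (r : List Int) (hr : pvWF r) :
    ∀ d, pvShape d 11 →
      pvShape (pvApplyRectB d r) 11 ∧
      ∀ y x : Int, (0 ≤ y ∧ y ≤ 9) → (0 ≤ x ∧ x ≤ 9) →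
        pvQuad (pvApplyRectB d r) y x = pvQuad d y x + pvContrib r y x := by
  intro d hd
  simp only [pvApplyRectB]
  set X0 := PySem.List.pyGetD r 0 0 with hX0
  set Y0 := PySem.List.pyGetD r 1 0 with hY0
  set X2 := PySem.List.pyGetD r 2 0 with hX2
  set Y2 := PySem.List.pyGetD r 3 0 with hY2
  set V := PySem.List.pyGetD r 4 0 with hV
  by_cases hc : X0 ≤ X2 ∧ Y0 ≤ Y2
  · rw [if_pos hc]
    obtain ⟨hb1, hb2, hb3, hb4⟩ : 0 ≤ X0 ∧ X2 ≤ 9 ∧ 0 ≤ Y0 ∧ Y2 ≤ 9 := by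
      rcases hr.2 with h | h | h
      · rw [← hX0, ← hX2] at h; omega
      · rw [← hY0, ← hY2] at h; omega
      · rw [← hX0, ← hX2, ← hY0, ← hY2] at h; exact h
    have hs1 : pvShape (pvAdd2 d Y0 X0 V) 11 := pvShape_pvAdd2 hd (by omega) (by push_cast; omega) _ _
    have hs2 : pvShape (pvAdd2 (pvAdd2 d Y0 X0 V) Y0 (X2 + 1) (-V)) 11 :=
      pvShape_pvAdd2 hs1 (by omega) (by push_cast; omega) _ _
    have hs3 : pvShape (pvAdd2 (pvAdd2 (pvAdd2 d Y0 X0 V) Y0 (X2 + 1) (-V)) (Y2 + 1) X0 (-V)) 11 :=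
      pvShape_pvAdd2 hs2 (by omega) (by push_cast; omega) _ _
    have hs4 : pvShape (pvAdd2 (pvAdd2 (pvAdd2 (pvAdd2 d Y0 X0 V) Y0 (X2 + 1) (-V)) (Y2 + 1) X0 (-V)) (Y2 + 1) (X2 + 1) V) 11 :=
      pvShape_pvAdd2 hs3 (by omega) (by push_cast; omega) _ _
    refine ⟨hs4, ?_⟩
    intro y x hy hx
    have hcell : ∀ b a : Int, (0 ≤ b ∧ b < 11) → (0 ≤ a ∧ a < 11) →
        pvGet2 (pvAdd2 (pvAdd2 (pvAdd2 (pvAdd2 d Y0 X0 V) Y0 (X2 + 1) (-V)) (Y2 + 1) X0 (-V)) (Y2 + 1) (X2 + 1) V) b a =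
          pvGet2 d b a + (if b = Y0 ∧ a = X0 then V else 0) + (if b = Y0 ∧ a = X2 + 1 then -V else 0) +
            (if b = Y2 + 1 ∧ a = X0 then -V else 0) + (if b = Y2 + 1 ∧ a = X2 + 1 then V else 0) := by
      intro b a hb ha
      rw [pvGet2_pvAdd2 hs3 ⟨by omega, by push_cast; omega⟩ ⟨by omega, by push_cast; omega⟩
            ⟨hb.1, by push_cast; omega⟩ ⟨ha.1, by push_cast; omega⟩ V,
          pvGet2_pvAdd2 hs2 ⟨by omega, by push_cast; omega⟩ ⟨by omega, by push_cast; omega⟩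
            ⟨hb.1, by push_cast; omega⟩ ⟨ha.1, by push_cast; omega⟩ (-V),
          pvGet2_pvAdd2 hs1 ⟨by omega, by push_cast; omega⟩ ⟨by omega, by push_cast; omega⟩
            ⟨hb.1, by push_cast; omega⟩ ⟨ha.1, by push_cast; omega⟩ (-V),
          pvGet2_pvAdd2 hd ⟨by omega, by push_cast; omega⟩ ⟨by omega, by push_cast; omega⟩
            ⟨hb.1, by push_cast; omega⟩ ⟨ha.1, by push_cast; omega⟩ V]
    unfold pvQuad
    have hrow : ∀ b ∈ PySem.List.pyRange 0 (y + 1),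
        ((PySem.List.pyRange 0 (x + 1)).map (fun a =>
          pvGet2 (pvAdd2 (pvAdd2 (pvAdd2 (pvAdd2 d Y0 X0 V) Y0 (X2 + 1) (-V)) (Y2 + 1) X0 (-V)) (Y2 + 1) (X2 + 1) V) b a)).sum =
        ((PySem.List.pyRange 0 (x + 1)).map (fun a => pvGet2 d b a)).sum +
          ((if b = Y0 then V * (List.count X0 (PySem.List.pyRange 0 (x + 1)) : Int) else 0) +
           (if b = Y0 then (-V) * (List.count (X2 + 1) (PySem.List.pyRange 0 (x + 1)) : Int) else 0) +
           (if b = Y2 + 1 then (-V) * (List.count X0 (PySem.List.pyRange 0 (x + 1)) : Int) else 0) +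
           (if b = Y2 + 1 then V * (List.count (X2 + 1) (PySem.List.pyRange 0 (x + 1)) : Int) else 0)) := by
      intro b hb
      have hbm := PySem.List.mem_pyRange_one.mp hb
      rw [List.map_congr_left (fun a ha => hcell b a ⟨by omega, by omega⟩
            ⟨(PySem.List.mem_pyRange_one.mp ha).1, by have := (PySem.List.mem_pyRange_one.mp ha).2; omega⟩)]
      rw [PySem.List.sum_map_add_int, PySem.List.sum_map_add_int, PySem.List.sum_map_add_int,
          PySem.List.sum_map_add_int, pvSumPt2, pvSumPt2, pvSumPt2, pvSumPt2]
      ring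
    rw [List.map_congr_left hrow, PySem.List.sum_map_add_int, PySem.List.sum_map_add_int,
        PySem.List.sum_map_add_int, PySem.List.sum_map_add_int, pvSumPt, pvSumPt, pvSumPt, pvSumPt]
    simp only [pvContrib, ← hX0, ← hY0, ← hX2, ← hY2, ← hV]
    rw [pvCount_pyRange, pvCount_pyRange, pvCount_pyRange, pvCount_pyRange]
    split_ifs <;> (try push_cast) <;> first | ring1 | (exfalso; omega)
  · rw [if_neg hc]
    refine ⟨hd, ?_⟩
    intro y x hy hx
    simp only [pvContrib, ← hX0, ← hY0, ← hX2, ← hY2, ← hV]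
    rw [if_neg (by rintro ⟨a, b, c, e⟩; exact hc ⟨by omega, by omega⟩)]
    ring

theorem pvDiffB (rs : List (List Int)) (hrs : ∀ r ∈ rs, pvWF r) :
    ∀ d, pvShape d 11 →
      pvShape (rs.foldl pvApplyRectB d) 11 ∧
      ∀ y x : Int, (0 ≤ y ∧ y ≤ 9) → (0 ≤ x ∧ x ≤ 9) →
        pvQuad (rs.foldl pvApplyRectB d) y x = pvQuad d y x + pvVal rs y x := by
  induction rs with
  | nil => intro d hd; exact ⟨hd, by intro y x hy hx; simp [pvVal]⟩
  | cons r rs ih =>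
    intro d hd
    obtain ⟨hs1, hv1⟩ := pvRectB r (hrs r (by simp)) d hd
    obtain ⟨hs, hv⟩ := ih (fun r hr => hrs r (by simp [hr])) _ hs1
    refine ⟨hs, ?_⟩
    intro y x hy hx
    rw [List.foldl_cons, hv y x hy hx, hv1 y x hy hx]
    simp [pvVal]; ring

theorem pvQuad_zero (y x : Int) :
    pvQuad (List.replicate 11 (List.replicate 11 (0 : Int))) y x = 0 := by
  unfold pvQuad
  rw [List.map_congr_left (fun b _ => by
    rw [List.map_congr_left (fun a _ => pvGet2_zero 11 11 b a)]
    simp : ∀ b ∈ PySem.List.pyRange 0 (y+1),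
      ((PySem.List.pyRange 0 (x + 1)).map (fun a =>
        pvGet2 (List.replicate 11 (List.replicate 11 (0:Int))) b a)).sum = 0)]
  simp

theorem pvQuad_succ (d : List (List Int)) (y x : Int) (hy : 0 ≤ y) :
    pvQuad d y x = pvQuad d (y - 1) x +
      ((PySem.List.pyRange 0 (x + 1)).map (fun a => pvGet2 d y a)).sum := by
  unfold pvQuad
  rw [show y + 1 = (y - 1 + 1) + 1 by ring,
      PySem.List.pyRange_one_succ_right (a := 0) (b := y - 1 + 1) (by omega)]
  rw [List.map_append, List.sum_append, show y - 1 + 1 = y by ring]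
  simp

theorem pvScan (f g : Int → Int) (m : Nat) :
    (PySem.List.pyRange 0 (m : Int)).foldl
        (fun (t : Int × List Int) x => (t.1 + f x, t.2 ++ [t.1 + f x + g x])) ((0 : Int), ([] : List Int)) =
      (((PySem.List.pyRange 0 (m : Int)).map f).sum,
        (PySem.List.pyRange 0 (m : Int)).map (fun x =>
          ((PySem.List.pyRange 0 (x + 1)).map f).sum + g x)) := by
  induction m with
  | zero => simp [pvPyRange_nil]
  | succ m ih =>
    rw [show ((m + 1 : Nat) : Int) = (m : Int) + 1 by push_cast; ring,
        PySem.List.pyRange_one_succ_right (a := 0) (b := (m : Int)) (by positivity)]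
    rw [List.foldl_append, ih]
    simp only [List.foldl_cons, List.foldl_nil, List.map_append, List.sum_append,
      List.map_cons, List.sum_cons, List.map_nil, List.sum_nil]
    rw [PySem.List.pyRange_one_succ_right (a := 0) (b := (m : Int)) (by positivity),
        List.map_append, List.sum_append]
    simp

theorem pvPhase2 (d : List (List Int)) : ∀ (k : Nat),
    ((PySem.List.pyRange 0 (k : Int)).foldl (fun (s : List Int × Int) (y : Int) =>
      let inner := (PySem.List.pyRange 0 10).foldl (fun (t : Int × List Int) (x : Int) =>
          let run := t.1 + pvGet2 d y x
          (run, t.2 ++ [run + PySem.List.pyGetD s.1 x 0])) ((0 : Int), ([] : List Int))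
      (inner.2, s.2 + (PySem.List.count inner.2 3 : Int)))
      (List.replicate 10 (0 : Int), (0 : Int))) =
    ((PySem.List.pyRange 0 10).map (fun x => pvQuad d ((k : Int) - 1) x),
     ((PySem.List.pyRange 0 (k : Int)).map (fun y =>
        (List.count 3 ((PySem.List.pyRange 0 10).map (fun x => pvQuad d y x)) : Int))).sum) := by
  intro k
  induction k with
  | zero =>
    rw [show ((0 : Nat) : Int) = 0 by norm_num, pvPyRange_nil (a := 0) (b := 0) le_rfl]
    simp only [List.foldl_nil, List.map_nil, List.sum_nil]
    have hQ : ∀ x ∈ PySem.List.pyRange 0 10, pvQuad d (0 - 1) x = (0 : Int) := by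
      intro x _
      unfold pvQuad
      rw [show (0 : Int) - 1 + 1 = 0 by ring, pvPyRange_nil (a := 0) (b := 0) le_rfl]
      simp
    rw [Prod.mk.injEq]
    exact ⟨by rw [List.map_congr_left hQ]; rfl, rfl⟩
  | succ k ih =>
    rw [show ((k + 1 : Nat) : Int) = (k : Int) + 1 by push_cast; ring,
        PySem.List.pyRange_one_succ_right (a := 0) (b := (k : Int)) (by positivity),
        List.foldl_append, ih]
    simp only [List.foldl_cons, List.foldl_nil]
    have hscan := pvScan (fun x => pvGet2 d (k : Int) x)
      (fun x => PySem.List.pyGetD ((PySem.List.pyRange 0 10).map (fun x => pvQuad d ((k : Int) - 1) x)) x 0) 10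
    rw [show ((10 : Nat) : Int) = 10 by norm_num] at hscan
    rw [hscan]
    have hrow : ∀ x ∈ PySem.List.pyRange 0 10,
        ((PySem.List.pyRange 0 (x + 1)).map (fun a => pvGet2 d (k : Int) a)).sum +
          PySem.List.pyGetD ((PySem.List.pyRange 0 10).map (fun x => pvQuad d ((k : Int) - 1) x)) x 0 =
        pvQuad d (k : Int) x := by
      intro x hx
      have hxm := PySem.List.mem_pyRange_one.mp hx
      have hx' : x = ((x.toNat : Nat) : Int) := by omega
      rw [show (10 : Int) = ((10 : Nat) : Int) by norm_num, hx',
          PySem.List.pyGetD_map_pyRange _ 10 x.toNat 0 (by omega)]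
      rw [pvQuad_succ d ((k : Int)) ((x.toNat : Nat) : Int) (by positivity)]
      ring
    rw [List.map_congr_left hrow]
    rw [List.map_append, List.sum_append, Prod.mk.injEq]
    refine ⟨?_, ?_⟩
    · rw [show ((k : Int) + 1 - 1) = (k : Int) by ring]
    · simp [PySem.List.count]

def pvAnswer (rs : List (List Int)) : Int :=
  ((PySem.List.pyRange 0 10).map (fun y =>
    ((List.countP (fun x => pvVal rs y x == 3) (PySem.List.pyRange 0 10) : Nat) : Int))).sum


def pvCountA (canvas : List (List Int)) : Int :=
  (PySem.List.pyRange 0 10).foldl (fun cnt i =>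
    (PySem.List.pyRange 0 10).foldl (fun cnt j =>
      if pvGet2 canvas i j = 3 then cnt + 1 else cnt) cnt) 0

def pvPhaseB (d : List (List Int)) : Int :=
  ((PySem.List.pyRange 0 10).foldl (fun (s : List Int × Int) (y : Int) =>
      let inner := (PySem.List.pyRange 0 10).foldl (fun (t : Int × List Int) (x : Int) =>
          let run := t.1 + pvGet2 d y x
          (run, t.2 ++ [run + PySem.List.pyGetD s.1 x 0])) ((0 : Int), ([] : List Int))
      (inner.2, s.2 + (PySem.List.count inner.2 3 : Int)))
    (List.replicate 10 (0 : Int), (0 : Int))).2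

theorem pvCountA_eq (canvas : List (List Int)) (rs : List (List Int))
    (h : ∀ i j : Int, (0 ≤ i ∧ i < 10) → (0 ≤ j ∧ j < 10) → pvGet2 canvas i j = pvVal rs i j) :
    pvCountA canvas = pvAnswer rs := by
  unfold pvCountA
  simp only [PySem.List.foldl_ite_add_one]
  rw [PySem.List.foldl_add, zero_add]
  unfold pvAnswer
  refine congrArg List.sum (List.map_congr_left ?_)
  intro i hi
  have hi' := PySem.List.mem_pyRange_one.mp hi
  norm_cast
  refine List.countP_congr ?_
  intro j hj
  have hj' := PySem.List.mem_pyRange_one.mp hj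
  simp [h i j ⟨hi'.1, hi'.2⟩ ⟨hj'.1, hj'.2⟩]

theorem pvPhaseB_eq (d : List (List Int)) (rs : List (List Int))
    (h : ∀ y x : Int, (0 ≤ y ∧ y ≤ 9) → (0 ≤ x ∧ x ≤ 9) → pvQuad d y x = pvVal rs y x) :
    pvPhaseB d = pvAnswer rs := by
  unfold pvPhaseB
  have hph := pvPhase2 d 10
  rw [show ((10 : Nat) : Int) = (10 : Int) by norm_num] at hph
  rw [hph]
  unfold pvAnswer
  refine congrArg List.sum (List.map_congr_left ?_)
  intro y hy
  have hy' := PySem.List.mem_pyRange_one.mp hy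
  rw [List.count_eq_countP, List.countP_map]
  norm_cast
  refine List.countP_congr ?_
  intro x hx
  have hx' := PySem.List.mem_pyRange_one.mp hx
  simp [Function.comp, h y x ⟨hy'.1, by omega⟩ ⟨hx'.1, by omega⟩]

theorem pvA (arr : List (List Int)) (n : Int) (h1 : n ≤ (arr.length : Int))
    (hrs : ∀ r ∈ arr.take n.toNat, pvWF r) :
    paintCanvas arr n = pvAnswer (arr.take n.toNat) := by
  have hsh0 : pvShape (List.replicate 10 (List.replicate 10 (0 : Int))) 10 :=
    ⟨by simp, fun row hrow => by rw [List.eq_of_mem_replicate hrow]; simp⟩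
  obtain ⟨-, hv⟩ := pvCanvasA _ hrs (List.replicate 10 (List.replicate 10 (0 : Int))) hsh0
  have hfold : (PySem.List.pyRange 0 n).foldl (fun c i => pvPaintRectA c (PySem.List.pyGetD arr i []))
      (List.replicate 10 (List.replicate 10 (0 : Int))) =
      (arr.take n.toNat).foldl pvPaintRectA (List.replicate 10 (List.replicate 10 (0 : Int))) := by
    rw [← pvRows arr n h1, List.foldl_map]
  show pvCountA ((PySem.List.pyRange 0 n).foldl (fun c i => pvPaintRectA c (PySem.List.pyGetD arr i []))
      (List.replicate 10 (List.replicate 10 (0 : Int)))) = pvAnswer (arr.take n.toNat)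
  rw [congrArg pvCountA hfold]
  refine pvCountA_eq _ _ ?_
  intro i j hi hj
  rw [hv i j hi hj, pvGet2_zero]
  ring

theorem pvB (arr : List (List Int)) (n : Int) (h1 : n ≤ (arr.length : Int))
    (hrs : ∀ r ∈ arr.take n.toNat, pvWF r) :
    paintCanvas_alt arr n = pvAnswer (arr.take n.toNat) := by
  have hsh0 : pvShape (List.replicate 11 (List.replicate 11 (0 : Int))) 11 :=
    ⟨by simp, fun row hrow => by rw [List.eq_of_mem_replicate hrow]; simp⟩
  obtain ⟨-, hq⟩ := pvDiffB _ hrs (List.replicate 11 (List.replicate 11 (0 : Int))) hsh0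
  have hfold : (PySem.List.pyRange 0 n).foldl (fun d i => pvApplyRectB d (PySem.List.pyGetD arr i []))
      (List.replicate 11 (List.replicate 11 (0 : Int))) =
      (arr.take n.toNat).foldl pvApplyRectB (List.replicate 11 (List.replicate 11 (0 : Int))) := by
    rw [← pvRows arr n h1, List.foldl_map]
  show pvPhaseB ((PySem.List.pyRange 0 n).foldl (fun d i => pvApplyRectB d (PySem.List.pyGetD arr i []))
      (List.replicate 11 (List.replicate 11 (0 : Int)))) = pvAnswer (arr.take n.toNat)
  rw [congrArg pvPhaseB hfold]
  refine pvPhaseB_eq _ _ ?_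
  intro y x hy hx
  rw [hq y x hy hx, pvQuad_zero]
  ring

theorem pvFinal (arr : List (List Int)) (n : Int)
    (h1 : n ≤ (arr.length : Int)) (h2 : ∀ r ∈ arr.take n.toNat, pvWF r) :
    paintCanvas arr n = paintCanvas_alt arr n := by
  rw [pvA arr n h1 h2, pvB arr n h1 h2]

-- ===== VERDICT (by name: the statement is the Claim_ definition above) =====
theorem paintCanvas_spec : Claim_equal_paintCanvas := by
  intro arr n hdom hpre
  show paintCanvas arr n = paintCanvas_alt arr n
  exact pvFinal arr n hpre.1 hpre.2
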